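-- pv_equiv track=rewrite | github.com/syyun13/python_coding_test | week3-search/lv3_budget.py | solution
-- ===== SOURCE A (Python) =====
-- def solution(budgets, M):
--     answer = 0
--     budgets.sort()
--
--     total = sum(budgets)
--     if total <= M:
--         return budgets[-1]
--
--     min_budget = 1
--     max_budget = budgets[-1]
--     recent_midpoint = 0
--
--     while min_budget <= max_budget:
--         midpoint = int( (min_budget + max_budget) / 2 )
--         current_sum = sum([min(midpoint, budget) for budget in budgets])
--         if recent_midpoint == midpoint:
--             return midpoint
--         if current_sum > M:
--             max_budget = midpoint - 1
--         else:
--             answer = midpoint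
--             min_budget = midpoint + 1
--         recent_midpoint = midpoint
--
--     return answer
-- ===== SOURCE B (Python) =====
-- def solution(budgets, M):
--     # Sort + one pass over prefix sums: locate the linear segment where the capped
--     # sum crosses M and compute the cap by integer division. (Also sorts budgets
--     # in place, like the original.)
--     budgets.sort()
--     n = len(budgets)
--     if sum(budgets) <= M:
--         return budgets[-1]
--     prefix = 0
--     for i, b in enumerate(budgets):
--         k = n - i
--         if prefix + b * k > M:
--             cand = (M - prefix) // k
--             return cand if cand > 0 else 0
--         prefix += b
--     return 0  # unreachable: total > M triggers the branch at the last index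
-- ===== Notes on version B (the rewrite author's own statement) =====
-- stated objective: alternative
-- what changed: Replaces A's binary search over the cap value (recomputing the full capped sum at every probe) with a single pass over the sorted list keeping a running prefix sum, locating the segment where the capped sum crosses M and computing the cap by one integer division; overall cost stays sort-dominated.
import Mathlib
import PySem

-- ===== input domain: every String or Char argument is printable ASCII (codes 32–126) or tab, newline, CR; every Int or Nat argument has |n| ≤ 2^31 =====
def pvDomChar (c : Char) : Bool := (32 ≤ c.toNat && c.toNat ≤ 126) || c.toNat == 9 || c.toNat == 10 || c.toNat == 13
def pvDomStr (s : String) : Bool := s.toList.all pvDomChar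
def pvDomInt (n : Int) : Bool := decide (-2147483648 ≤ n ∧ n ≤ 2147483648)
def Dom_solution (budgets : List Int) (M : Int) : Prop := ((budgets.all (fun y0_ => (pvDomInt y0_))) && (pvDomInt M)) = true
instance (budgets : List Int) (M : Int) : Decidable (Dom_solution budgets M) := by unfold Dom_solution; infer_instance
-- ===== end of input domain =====

-- B replaces A's binary search over the cap (a capped sum per probe) by one pass over the
-- sorted list with a running prefix sum, computing the cap by integer division; equivalence
-- is about the RETURN value (both Pythons also sort `budgets` in place).

-- ===== PORT A =====
-- while-loop of A: state (answer, min_budget, max_budget, recent_midpoint).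
-- `int((lo+hi)/2)` = floor division here: lo ≥ 1 on every entered iteration, so lo+hi > 0,
-- and |lo+hi| ≤ 2^32 < 2^53 keeps the float division exact.
def solutionLoop (budgets : List Int) (M : Int) (answer lo hi recent : Int) : Int :=
  if h : lo ≤ hi then
    let mid := PySem.Int.floordiv (lo + hi) 2
    let cur := (budgets.map (fun b => min mid b)).sum
    if recent = mid then mid
    else if cur > M then solutionLoop budgets M answer lo (mid - 1) mid
    else solutionLoop budgets M mid (mid + 1) hi mid
  else answer
termination_by (hi + 1 - lo).toNat
decreasing_by
  · have := PySem.Int.floordiv_two_mid_bounds h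
    omega
  · have := PySem.Int.floordiv_two_mid_bounds h
    omega

def solution (budgets : List Int) (M : Int) : Int :=
  let s := PySem.List.sorted budgets (fun x => x) false
  let total := s.sum
  if total ≤ M then (PySem.List.pyGet? s (-1)).getD 0   -- budgets[-1]; IndexError on [] excluded by Pre_
  else
    let maxB := (PySem.List.pyGet? s (-1)).getD 0       -- budgets[-1]; same remark
    solutionLoop s M 0 1 maxB 0

-- ===== PORT B =====
-- for-loop of B: `rest` is the unvisited suffix, `pfx` the sum of the visited prefix,
-- `k` the Python value n - i (= rest.length at the call sites).
def altLoop (M : Int) : List Int → Int → Int → Int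
  | [], _, _ => 0
  | b :: rest, pfx, k =>
    if pfx + b * k > M then
      let cand := PySem.Int.floordiv (M - pfx) k
      if cand > 0 then cand else 0
    else altLoop M rest (pfx + b) (k - 1)

def solution_alt (budgets : List Int) (M : Int) : Int :=
  let s := PySem.List.sorted budgets (fun x => x) false
  if s.sum ≤ M then (PySem.List.pyGet? s (-1)).getD 0   -- budgets[-1]; IndexError on [] excluded by Pre_
  else altLoop M s 0 s.length

-- ===== PRECONDITION & SPEC =====
-- A evaluates budgets[-1], an IndexError on the empty list: Pre_ excludes budgets = [].
def Pre_solution (budgets : List Int) (M : Int) : Prop := budgets ≠ []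
instance (budgets : List Int) (M : Int) : Decidable (Pre_solution budgets M) := by unfold Pre_solution; infer_instance
def pvWitness_solution : List Int × Int := ([1, 2, 3], 4)

def Spec_solution (budgets : List Int) (M : Int) (out : Int) : Prop := out = solution_alt budgets M
instance (budgets : List Int) (M : Int) (out : Int) : Decidable (Spec_solution budgets M out) := by unfold Spec_solution; infer_instance

-- ===== CLAIM (what is proved, stated in full; the proofs are below) =====
def Claim_equal_solution : Prop := ∀ (budgets : List Int) (M : Int), Dom_solution budgets M → Pre_solution budgets M → Spec_solution budgets M (solution budgets M)

-- ===== LEMMAS AND PROOFS =====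

-- f s c = sum(min(c, b) for b in s), the capped sum both programs reason about
def cappedSum (s : List Int) (c : Int) : Int := (s.map (fun b => min c b)).sum

theorem cappedSum_mono (s : List Int) {c c' : Int} (h : c ≤ c') :
    cappedSum s c ≤ cappedSum s c' := by
  induction s with
  | nil => simp [cappedSum]
  | cons b t ih =>
      simp only [cappedSum, List.map_cons, List.sum_cons] at *
      have : min c b ≤ min c' b := min_le_min h le_rfl
      omega

theorem cappedSum_of_le (s : List Int) (c : Int) (h : ∀ x ∈ s, x ≤ c) :
    cappedSum s c = s.sum := by
  induction s with
  | nil => rfl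
  | cons b t ih =>
      have hb : b ≤ c := h b (by simp)
      have ht := ih (fun x hx => h x (by simp [hx]))
      simp only [cappedSum, List.map_cons, List.sum_cons] at ht ⊢
      rw [min_eq_right hb, ht]

theorem cappedSum_of_ge (s : List Int) (c : Int) (h : ∀ x ∈ s, c ≤ x) :
    cappedSum s c = c * s.length := by
  induction s with
  | nil => simp [cappedSum]
  | cons b t ih =>
      have hb : c ≤ b := h b (by simp)
      have ht := ih (fun x hx => h x (by simp [hx]))
      simp only [cappedSum, List.map_cons, List.sum_cons] at ht ⊢
      rw [min_eq_left hb, ht]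
      push_cast [List.length_cons]
      ring

theorem cappedSum_append (t r : List Int) (c : Int) :
    cappedSum (t ++ r) c = cappedSum t c + cappedSum r c := by
  simp [cappedSum]

-- what both loops compute: the greatest cap in [lo, hi] with capped sum ≤ M, default ans
def Good (s : List Int) (M lo hi ans r : Int) : Prop :=
  (lo ≤ r ∧ r ≤ hi ∧ cappedSum s r ≤ M ∧ ∀ c, r < c → c ≤ hi → M < cappedSum s c)
  ∨ (r = ans ∧ ∀ c, lo ≤ c → c ≤ hi → M < cappedSum s c)

theorem Good_unique {s : List Int} {M lo hi ans r r' : Int}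
    (h : Good s M lo hi ans r) (h' : Good s M lo hi ans r') : r = r' := by
  rcases h with ⟨h1, h2, h3, h4⟩ | ⟨h1, h2⟩ <;> rcases h' with ⟨g1, g2, g3, g4⟩ | ⟨g1, g2⟩
  · rcases lt_trichotomy r r' with hlt | heq | hgt
    · exact absurd g3 (not_le.mpr (h4 r' hlt g2))
    · exact heq
    · exact absurd h3 (not_le.mpr (g4 r hgt h2))
  · exact absurd h3 (not_le.mpr (g2 r h1 h2))
  · exact absurd g3 (not_le.mpr (h2 r' g1 g2))
  · rw [h1, g1]

theorem solutionLoop_good (s : List Int) (M : Int) :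
    ∀ (n : Nat) (ans lo hi recent : Int), (hi + 1 - lo).toNat ≤ n →
      (recent < lo ∨ hi < recent) →
      Good s M lo hi ans (solutionLoop s M ans lo hi recent) := by
  intro n
  induction n with
  | zero =>
      intro ans lo hi recent hn hrec
      have hlh : ¬ lo ≤ hi := by omega
      rw [solutionLoop]
      simp only [hlh, dite_false]
      exact Or.inr ⟨rfl, fun c h1 h2 => absurd (h1.trans h2) (by omega)⟩
  | succ n ih =>
      intro ans lo hi recent hn hrec
      rw [solutionLoop]
      by_cases hlh : lo ≤ hi
      · simp only [hlh, dite_true]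
        have hmid := PySem.Int.floordiv_two_mid_bounds hlh
        set mid := PySem.Int.floordiv (lo + hi) 2 with hmiddef
        have hne : ¬ recent = mid := by omega
        simp only [hne, if_false]
        by_cases hc : (s.map (fun b => min mid b)).sum > M
        · simp only [hc, if_true]
          have h := ih ans lo (mid - 1) mid (by omega) (by omega)
          rcases h with ⟨h1, h2, h3, h4⟩ | ⟨h1, h2⟩
          · refine Or.inl ⟨h1, by omega, h3, fun c hc1 hc2 => ?_⟩
            by_cases hcm : c ≤ mid - 1
            · exact h4 c hc1 hcm
            · calc M < cappedSum s mid := hc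
                _ ≤ cappedSum s c := cappedSum_mono s (by omega)
          · refine Or.inr ⟨h1, fun c hc1 hc2 => ?_⟩
            by_cases hcm : c ≤ mid - 1
            · exact h2 c hc1 hcm
            · calc M < cappedSum s mid := hc
                _ ≤ cappedSum s c := cappedSum_mono s (by omega)
        · simp only [hc, if_false]
          have h := ih mid (mid + 1) hi mid (by omega) (by omega)
          rcases h with ⟨h1, h2, h3, h4⟩ | ⟨h1, h2⟩
          · exact Or.inl ⟨by omega, h2, h3, h4⟩
          · refine Or.inl ⟨by omega, by omega, by rw [h1]; exact not_lt.mp hc, fun c hc1 hc2 => ?_⟩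
            rw [h1] at hc1
            exact h2 c (by omega) hc2
      · simp only [hlh, dite_false]
        exact Or.inr ⟨rfl, fun c h1 h2 => absurd (h1.trans h2) (by omega)⟩

-- sortedness facts
theorem last_ge_of_pairwise {s : List Int} (hp : s.Pairwise (· ≤ ·)) {L : Int}
    (hL : s.getLast? = some L) : ∀ x ∈ s, x ≤ L := by
  induction s with
  | nil => simp at hL
  | cons b t ih =>
      intro x hx
      cases t with
      | nil =>
          simp at hL hx
          omega
      | cons b' t' =>
          have hL' : (b' :: t').getLast? = some L := by
            rw [List.getLast?_cons_cons] at hL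
            exact hL
          rcases List.mem_cons.mp hx with rfl | hx'
          · have hbL : b' :: t' ≠ [] := by simp
            have hLb : L ∈ b' :: t' := List.mem_of_getLast? hL'
            exact le_trans (List.rel_of_pairwise_cons hp hLb) le_rfl
          · exact ih (List.Pairwise.of_cons hp) hL' x hx'

theorem altLoop_good (M hi0 : Int) :
    ∀ (rest t : List Int), (t ++ rest).Pairwise (· ≤ ·) →
      (∀ x ∈ t ++ rest, x ≤ hi0) →
      (∀ L, t.getLast? = some L → t.sum + L * rest.length ≤ M) →
      M < (t ++ rest).sum →
      Good (t ++ rest) M 1 hi0 0 (altLoop M rest t.sum rest.length) := by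
  intro rest
  induction rest with
  | nil =>
      intro t hp hhi hinv hM
      rw [altLoop]
      cases ht : t.getLast? with
      | none =>
          have : t = [] := by
            cases t with
            | nil => rfl
            | cons a b => simp at ht
          subst this
          refine Or.inr ⟨rfl, fun c h1 h2 => ?_⟩
          simpa [cappedSum] using hM
      | some L =>
          have h1 := hinv L ht
          simp at hM h1
          omega
  | cons b r ih =>
      intro t hp hhi hinv hM
      rw [altLoop]
      have hklen : ((b :: r).length : Int) = (r.length : Int) + 1 := by
        simp
      rw [hklen]
      set k : Int := (r.length : Int) + 1 with hkdef
      have hk : (0 : Int) < k := by positivity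
      have hinv' : ∀ L, t.getLast? = some L → t.sum + L * k ≤ M := by
        intro L hL
        have := hinv L hL
        rwa [hklen] at this
      by_cases hstop : t.sum + b * k > M
      · simp only [hstop, if_true]
        set cand := PySem.Int.floordiv (M - t.sum) k with hcanddef
        have hlow : cand * k ≤ M - t.sum := (PySem.Int.le_floordiv_iff_mul_le hk).mp le_rfl
        have hhigh : M - t.sum < (cand + 1) * k := (PySem.Int.floordiv_lt_iff_lt_mul hk).mp (by omega)
        have hcb : cand < b := by
          rw [hcanddef]
          exact (PySem.Int.floordiv_lt_iff_lt_mul hk).mpr (by linarith)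
        -- every element of t is ≤ cand
        have htle : ∀ x ∈ t, x ≤ cand := by
          cases ht : t.getLast? with
          | none =>
              have : t = [] := by
                cases t with
                | nil => rfl
                | cons a b => simp at ht
              subst this; simp
          | some L =>
              intro x hx
              have hLc : L ≤ cand := by
                have h1 := hinv' L ht
                rw [hcanddef]
                exact (PySem.Int.le_floordiv_iff_mul_le hk).mpr (by linarith)
              have hpt : t.Pairwise (· ≤ ·) := hp.sublist (List.sublist_append_left t (b :: r))
              exact le_trans (last_ge_of_pairwise hpt ht x hx) hLc
        -- every element of b :: r is ≥ b
        have hrge : ∀ x ∈ b :: r, b ≤ x := by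
          intro x hx
          rcases List.mem_cons.mp hx with rfl | hx'
          · exact le_rfl
          · have := List.pairwise_append.mp hp
            exact List.rel_of_pairwise_cons this.2.1 hx'
        -- capped sum is linear on the segment [max t, b]
        have hseg : ∀ c, (∀ x ∈ t, x ≤ c) → c ≤ b → cappedSum (t ++ b :: r) c = t.sum + c * k := by
          intro c hct hcb'
          rw [cappedSum_append, cappedSum_of_le t c hct,
              cappedSum_of_ge (b :: r) c (fun x hx => le_trans hcb' (hrge x hx)), hklen]
        have hcand_le : cappedSum (t ++ b :: r) cand ≤ M := by
          rw [hseg cand htle (by omega)]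
          linarith
        have hnext_gt : ∀ c, cand < c → M < cappedSum (t ++ b :: r) c := by
          intro c hcc
          calc M < cappedSum (t ++ b :: r) (cand + 1) := by
                rw [hseg (cand + 1) (fun x hx => by have := htle x hx; omega) (by omega)]
                linarith
            _ ≤ cappedSum (t ++ b :: r) c := cappedSum_mono _ (by omega)
        have hbhi : b ≤ hi0 := hhi b (by simp)
        by_cases hcpos : cand > 0
        · simp only [hcpos, if_true]
          exact Or.inl ⟨by omega, by omega, hcand_le, fun c h1 _ => hnext_gt c h1⟩
        · simp only [hcpos, if_false]
          exact Or.inr ⟨rfl, fun c h1 _ => hnext_gt c (by omega)⟩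
      · simp only [hstop, if_false]
        have hre : t ++ b :: r = (t ++ [b]) ++ r := by simp
        have hk1 : k - 1 = (r.length : Int) := by omega
        have hsum : t.sum + b = (t ++ [b]).sum := by simp
        rw [hk1, hsum]
        rw [hre] at hp hhi hM ⊢
        refine ih (t ++ [b]) hp hhi ?_ hM
        intro L hL
        have hLb : L = b := by
          rw [List.getLast?_concat] at hL
          exact (Option.some_inj.mp hL).symm
        rw [hLb]
        have hsum2 : (t ++ [b]).sum = t.sum + b := by simp
        have hbk : b * k = b * (r.length : Int) + b := by rw [hkdef]; ring
        rw [hsum2]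
        linarith [not_lt.mp hstop]

-- ===== VERDICT (by name: the statement is the Claim_ definition above) =====
theorem solution_spec : Claim_equal_solution := by
  intro budgets M _ hpre
  unfold Spec_solution solution solution_alt
  set s := PySem.List.sorted budgets (fun x => x) false with hs
  by_cases hm : s.sum ≤ M
  · simp only [hm, if_true]
  · simp only [hm, if_false]
    have hsne : s ≠ [] := by
      rw [hs, Ne, PySem.List.sorted_eq_nil_iff]
      exact hpre
    obtain ⟨L, hL⟩ : ∃ L, s.getLast? = some L := by
      cases h : s.getLast? with
      | none => exact absurd (List.getLast?_eq_none_iff.mp h) hsne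
      | some L => exact ⟨L, rfl⟩
    have hget : (PySem.List.pyGet? s (-1)).getD 0 = L := by
      rw [PySem.List.pyGet?_neg_one, hL]; rfl
    rw [hget]
    have hp : s.Pairwise (· ≤ ·) := by
      have := PySem.List.sorted_pairwise budgets (fun x => x)
      rw [← hs] at this
      exact this
    have hA : Good s M 1 L 0 (solutionLoop s M 0 1 L 0) :=
      solutionLoop_good s M (L + 1 - 1).toNat 0 1 L 0 le_rfl (by omega)
    have hB : Good s M 1 L 0 (altLoop M s 0 s.length) := by
      have h := altLoop_good M L s [] (by simpa using hp)
        (by simpa using last_ge_of_pairwise hp hL)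
        (by intro L' hL'; simp at hL') (by simpa using not_le.mp hm)
      simpa using h
    exact Good_unique hA hB
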